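-- pv_equiv track=rewrite | github.com/damiankiwi/kurs_python | 22/044.py | extract_non_zero_blocks
-- ===== SOURCE A (Python) =====
-- def extract_non_zero_blocks(input_list):
--     non_zero_blocks = []
--     current_block = []
--
--     for num in input_list:
--         if num != 0:
--             current_block.append(num)
--         else:
--             if current_block:
--                 non_zero_blocks.append(current_block)
--                 current_block = []
--
--     if current_block:
--         non_zero_blocks.append(current_block)
--
--     return non_zero_blocks
-- ===== SOURCE B (Python) =====
-- def extract_non_zero_blocks(input_list):
--     blocks = []
--     n = len(input_list)
--     i = 0
--     while i < n:
--         if input_list[i] != 0: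
--             j = i + 1
--             while j < n and input_list[j] != 0:
--                 j += 1
--             blocks.append(input_list[i:j])
--             i = j
--         else:
--             i += 1
--     return blocks
-- ===== Notes on version B (the rewrite author's own statement) =====
-- stated objective: alternative
-- what changed: Replaces the per-element accumulator with zero-flush branches by a two-pointer scan: find the end of each maximal non-zero run and append that slice in one step.
import Mathlib
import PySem

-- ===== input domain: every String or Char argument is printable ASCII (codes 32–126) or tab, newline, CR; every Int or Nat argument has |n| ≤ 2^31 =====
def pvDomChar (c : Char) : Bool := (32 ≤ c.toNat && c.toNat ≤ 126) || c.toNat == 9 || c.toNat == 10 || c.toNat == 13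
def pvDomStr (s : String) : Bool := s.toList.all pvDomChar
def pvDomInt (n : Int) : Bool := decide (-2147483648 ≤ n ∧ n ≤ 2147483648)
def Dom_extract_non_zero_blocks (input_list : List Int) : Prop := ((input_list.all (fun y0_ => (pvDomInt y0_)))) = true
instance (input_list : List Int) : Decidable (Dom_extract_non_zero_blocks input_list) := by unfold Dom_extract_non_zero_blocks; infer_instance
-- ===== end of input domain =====

-- B replaces A's per-element accumulator with a two-pointer run scan appending slices; alternative decomposition, same O(n) cost, return values proved equal on all inputs.

-- ===== PORT A =====
-- loop body of A's for-loop: state = (non_zero_blocks, current_block)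
def pvStepA (st : List (List Int) × List Int) (num : Int) : List (List Int) × List Int :=
  if num ≠ 0 then (st.1, st.2 ++ [num])
  else if st.2 ≠ [] then (st.1 ++ [st.2], [])
  else st

def extract_non_zero_blocks (input_list : List Int) : List (List Int) :=
  let s := input_list.foldl pvStepA ([], [])
  if s.2 ≠ [] then s.1 ++ [s.2] else s.1

-- ===== PORT B =====
-- inner while loop of Source B: 'while j < n and input_list[j] != 0: j += 1'.
-- input_list[j] is ported as pyGetD input_list j 0, exact here because the
-- access is guarded by j < n and j only increases from a nonnegative start.
def pvFindJ (lst : List Int) (n j : Int) : Int :=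
  if _h : j < n ∧ PySem.List.pyGetD lst j 0 ≠ 0 then pvFindJ lst n (j + 1) else j
termination_by (n - j).toNat
decreasing_by omega

-- the inner loop never moves j backwards (needed for termination of pvGoB)
theorem pvFindJ_ge (lst : List Int) (n : Int) : ∀ j : Int, j ≤ pvFindJ lst n j := by
  intro j
  induction j using pvFindJ.induct (lst := lst) (n := n) with
  | case1 x h ih => rw [pvFindJ, dif_pos h]; omega
  | case2 x h => rw [pvFindJ, dif_neg h]

-- outer while loop of Source B; input_list[i] guarded by i < n as in the Python
def pvGoB (lst : List Int) (n i : Int) (blocks : List (List Int)) : List (List Int) :=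
  if _h : i < n then
    if PySem.List.pyGetD lst i 0 ≠ 0 then
      let j := pvFindJ lst n (i + 1)
      pvGoB lst n j (blocks ++ [PySem.List.slice lst (some i) (some j)])
    else pvGoB lst n (i + 1) blocks
  else blocks
termination_by (n - i).toNat
decreasing_by
  · have := pvFindJ_ge lst n (i + 1); omega
  · omega

def extract_non_zero_blocks_alt (input_list : List Int) : List (List Int) :=
  pvGoB input_list (input_list.length : Int) 0 []

-- ===== PRECONDITION & SPEC =====
def Spec_extract_non_zero_blocks (input_list : List Int) (out : List (List Int)) : Prop := out = extract_non_zero_blocks_alt input_list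
instance (input_list : List Int) (out : List (List Int)) : Decidable (Spec_extract_non_zero_blocks input_list out) := by unfold Spec_extract_non_zero_blocks; infer_instance

-- ===== CLAIM (what is proved, stated in full; the proofs are below) =====
def Claim_equal_extract_non_zero_blocks : Prop := ∀ (input_list : List Int), Dom_extract_non_zero_blocks input_list → Spec_extract_non_zero_blocks input_list (extract_non_zero_blocks input_list)

-- ===== LEMMAS AND PROOFS =====

-- reference form: the list of maximal non-zero runs, by structural recursion
def pvSimple : List Int → List (List Int)
  | [] => []
  | x :: xs =>
    if x ≠ 0 then (x :: xs.takeWhile (fun y => y != 0)) :: pvSimple (xs.dropWhile (fun y => y != 0))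
    else pvSimple xs
termination_by l => l.length
decreasing_by
  · have := List.length_dropWhile_le (p := fun y : Int => y != 0) (l := xs); simpa using Nat.lt_succ_of_le this
  · simp

theorem pvA_char (l : List Int) : ∀ (blocks : List (List Int)) (cur : List Int),
    (if (l.foldl pvStepA (blocks, cur)).2 ≠ [] then
        (l.foldl pvStepA (blocks, cur)).1 ++ [(l.foldl pvStepA (blocks, cur)).2]
      else (l.foldl pvStepA (blocks, cur)).1)
    = blocks ++ (if cur = [] then pvSimple l
        else (cur ++ l.takeWhile (fun y => y != 0)) :: pvSimple (l.dropWhile (fun y => y != 0))) := by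
  induction l with
  | nil =>
    intro blocks cur
    by_cases hc : cur = [] <;> simp [hc, List.foldl, pvSimple]
  | cons n ns ih =>
    intro blocks cur
    rw [List.foldl_cons]
    by_cases hn : n = 0
    · subst hn
      by_cases hc : cur = []
      · subst hc
        rw [show pvStepA (blocks, []) 0 = (blocks, []) by simp [pvStepA]]
        rw [ih blocks []]
        simp [pvSimple]
      · rw [show pvStepA (blocks, cur) 0 = (blocks ++ [cur], []) by simp [pvStepA, hc]]
        rw [ih (blocks ++ [cur]) []]
        simp [hc, pvSimple]
    · rw [show pvStepA (blocks, cur) n = (blocks, cur ++ [n]) by simp [pvStepA, hn]]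
      rw [ih blocks (cur ++ [n])]
      by_cases hc : cur = []
      · subst hc
        simp [pvSimple, hn]
      · simp [hc, hn]

theorem pvA_eq_simple (l : List Int) : extract_non_zero_blocks l = pvSimple l := by
  have := pvA_char l [] []
  simpa [extract_non_zero_blocks] using this

theorem pvFindJ_char (lst : List Int) : ∀ j : Int, 0 ≤ j →
    pvFindJ lst (lst.length : Int) j
      = j + (((lst.drop j.toNat).takeWhile (fun y => y != 0)).length : Int) := by
  intro j
  induction j using pvFindJ.induct (lst := lst) (n := ((lst.length : Int))) with
  | case1 x h ih =>
    intro hx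
    have hlt : x.toNat < lst.length := by omega
    have hval : PySem.List.pyGetD lst x 0 = lst[x.toNat] :=
      PySem.List.pyGetD_eq_getElem lst 0 hx (by omega)
    have hne : (lst[x.toNat] != 0) = true := by
      rw [hval] at h; simpa using h.2
    have hsucc : (x + 1).toNat = x.toNat + 1 := by omega
    have htw : List.takeWhile (fun y => y != 0) (List.drop x.toNat lst)
        = lst[x.toNat] :: List.takeWhile (fun y => y != 0) (List.drop (x.toNat + 1) lst) := by
      rw [List.drop_eq_getElem_cons hlt, List.takeWhile_cons]
      simp [hne]
    rw [pvFindJ, dif_pos h, ih (by omega), hsucc, htw, List.length_cons]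
    push_cast
    ring
  | case2 x h =>
    intro hx
    rw [pvFindJ, dif_neg h]
    rcases lt_or_ge x ((lst.length : Int)) with hlt | hge
    · have hlt' : x.toNat < lst.length := by omega
      have hval : PySem.List.pyGetD lst x 0 = lst[x.toNat] :=
        PySem.List.pyGetD_eq_getElem lst 0 hx (by omega)
      have hz : lst[x.toNat] = 0 := by
        by_contra hc
        exact h ⟨hlt, by rw [hval]; exact hc⟩
      rw [List.drop_eq_getElem_cons hlt', List.takeWhile_cons]
      simp [hz]
    · rw [List.drop_eq_nil_of_le (by omega)]
      simp

theorem pvGoB_char (l : List Int) : ∀ (k : Nat) (i : Int) (blocks : List (List Int)),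
    0 ≤ i → ((l.length : Int) - i).toNat ≤ k →
    pvGoB l (l.length : Int) i blocks = blocks ++ pvSimple (l.drop i.toNat) := by
  intro k
  induction k with
  | zero =>
    intro i blocks hi hk
    have hge : ¬ i < (l.length : Int) := by omega
    rw [pvGoB, dif_neg hge, List.drop_eq_nil_of_le (by omega)]
    simp [pvSimple]
  | succ k ih =>
    intro i blocks hi hk
    by_cases hlt : i < (l.length : Int)
    · have hm : i.toNat < l.length := by omega
      have hdrop := List.drop_eq_getElem_cons hm
      have hval : PySem.List.pyGetD l i 0 = l[i.toNat] :=
        PySem.List.pyGetD_eq_getElem l 0 hi (by omega)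
      by_cases hx : l[i.toNat] = 0
      · rw [pvGoB, dif_pos hlt, if_neg (by rw [hval]; simpa using hx),
           ih (i + 1) blocks (by omega) (by omega), hdrop]
        have h1 : (i + 1).toNat = i.toNat + 1 := by omega
        rw [h1, pvSimple]
        simp [hx]
      · -- non-zero head: one whole run is appended
        set t := l.drop (i.toNat + 1) with ht
        set w := (t.takeWhile (fun y => y != 0)).length with hw
        have hfj : pvFindJ l (l.length : Int) (i + 1) = (i + 1) + (w : Int) := by
          rw [pvFindJ_char l (i + 1) (by omega)]
          have : (i + 1).toNat = i.toNat + 1 := by omega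
          rw [this, ← ht, ← hw]
        have hwle : i.toNat + 1 + w ≤ l.length := by
          have h1 : w ≤ t.length := (List.takeWhile_prefix _).length_le
          have h2 : t.length = l.length - (i.toNat + 1) := by rw [ht]; simp
          omega
        have hslice : PySem.List.slice l (some i) (some ((i + 1) + (w : Int)))
            = l[i.toNat] :: t.takeWhile (fun y => y != 0) := by
          rw [PySem.List.slice_toNat _ hi (by omega)]
          have h1 : ((i + 1) + (w : Int)).toNat - i.toNat = w + 1 := by omega
          rw [h1, hdrop]
          have h2 : (t.takeWhile (fun y => y != 0)) ++ (t.dropWhile (fun y => y != 0)) = t :=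
            List.takeWhile_append_dropWhile
          rw [List.take_succ_cons]
          congr 1
          conv_lhs => rw [← h2]
          exact List.take_left' hw.symm
        have hrest : l.drop ((i + 1) + (w : Int)).toNat = t.dropWhile (fun y => y != 0) := by
          have h1 : ((i + 1) + (w : Int)).toNat = (i.toNat + 1) + w := by omega
          rw [h1, ← List.drop_drop, ← ht]
          conv_lhs => rw [← List.takeWhile_append_dropWhile (p := fun y : Int => y != 0) (l := t)]
          exact List.drop_left' hw.symm
        rw [pvGoB, dif_pos hlt, if_pos (by rw [hval]; simpa using hx)]
        simp only [hfj, hslice]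
        rw [ih ((i + 1) + (w : Int)) _ (by omega) (by omega), hrest, hdrop, pvSimple]
        have hxne : (decide ¬l[i.toNat] = 0) = true := by simpa using hx
        simp only [ne_eq, hx, not_false_iff, if_true]
        simp [List.append_assoc]
    · rw [pvGoB, dif_neg hlt, List.drop_eq_nil_of_le (by omega)]
      simp [pvSimple]

theorem pvB_eq_simple (l : List Int) : extract_non_zero_blocks_alt l = pvSimple l := by
  have := pvGoB_char l ((l.length : Int) - 0).toNat 0 [] (by omega) (le_refl _)
  simpa [extract_non_zero_blocks_alt] using this

-- ===== VERDICT (by name: the statement is the Claim_ definition above) =====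
theorem extract_non_zero_blocks_spec : Claim_equal_extract_non_zero_blocks := by
  intro l _
  unfold Spec_extract_non_zero_blocks
  rw [pvA_eq_simple, pvB_eq_simple]
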